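-- pv_equiv track=rewrite | github.com/jvecodev/TDE2_Mapper | with_comments/mru.py | algoritmo_mru
-- ===== SOURCE A (Python) =====
-- def algoritmo_mru(sequencia_paginas, num_quadros, pagina_alvo):
--     """
--     Simula o algoritmo MRU (Most Recently Used) silenciosamente e retorna
--     a posição final de uma página específica.
--
--     Args:
--         sequencia_paginas (list): A lista de páginas a serem acessadas.
--         num_quadros (int): O número de quadros disponíveis na memória.
--         pagina_alvo (int): A página cuja posição final queremos encontrar.
--
--     Returns:
--         str: Uma string informando a posição final da página alvo.
--     """
--     quadros = []  # Lista que armazenará as páginas atualmente na memória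
--     uso_recente = {}  # Dicionário para registrar o último uso de cada página
--
--     for tempo, pagina in enumerate(sequencia_paginas):
--         # Caso a página já esteja na memória, atualiza seu tempo de uso
--         if pagina in quadros:
--             uso_recente[pagina] = tempo
--         else:
--             # Caso ainda haja espaço disponível
--             if len(quadros) < num_quadros:
--                 quadros.append(pagina)
--                 uso_recente[pagina] = tempo
--             else:
--                 # Encontra a página mais recentemente usada
--                 pagina_mru = max(uso_recente, key=uso_recente.get)
--                 indice_substituicao = quadros.index(pagina_mru)
--
--                 # Substitui a página antiga pela nova
--                 quadros[indice_substituicao] = pagina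
--
--                 # Atualiza os registros de uso
--                 del uso_recente[pagina_mru]
--                 uso_recente[pagina] = tempo
--     # --- Fim da Simulação ---
--
--     # Tenta encontrar a página alvo na lista final de quadros
--     try:
--         indice = quadros.index(pagina_alvo)
--         quadro_final = indice + 1
--         return f"Para a sequência fornecida, a página {pagina_alvo} se encontra no Quadro {quadro_final}."
--     except ValueError:
--         return f"Ao final, a página {pagina_alvo} não estava na memória."
-- ===== SOURCE B (Python) =====
-- def algoritmo_mru(sequencia_paginas, num_quadros, pagina_alvo):
--     """MRU simulation in O(1) per access: a slot dictionary plus the observation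
--     that the most-recently-used page is always the page accessed last, so the
--     victim needs no max() scan and no per-page timestamps."""
--     pos = {}    # page -> frame slot (0-based)
--     mru = None  # page most recently used = the page accessed on the previous step
--     for pagina in sequencia_paginas:
--         if pagina not in pos:
--             if len(pos) < num_quadros:
--                 pos[pagina] = len(pos)       # next free frame
--             else:
--                 pos[pagina] = pos.pop(mru)   # evict the MRU page, reuse its slot
--         mru = pagina
--     if pagina_alvo in pos:
--         return f"Para a sequência fornecida, a página {pagina_alvo} se encontra no Quadro {pos[pagina_alvo] + 1}."
--     return f"Ao final, a página {pagina_alvo} não estava na memória."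
-- ===== Notes on version B (the rewrite author's own statement) =====
-- stated objective: faster
-- what changed: B replaces the frames list + timestamp dict + per-miss max() scan by a single page->slot dictionary and the observation that the MRU victim is always the page accessed on the previous step, so each access is O(1) with no scans.
import Mathlib
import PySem

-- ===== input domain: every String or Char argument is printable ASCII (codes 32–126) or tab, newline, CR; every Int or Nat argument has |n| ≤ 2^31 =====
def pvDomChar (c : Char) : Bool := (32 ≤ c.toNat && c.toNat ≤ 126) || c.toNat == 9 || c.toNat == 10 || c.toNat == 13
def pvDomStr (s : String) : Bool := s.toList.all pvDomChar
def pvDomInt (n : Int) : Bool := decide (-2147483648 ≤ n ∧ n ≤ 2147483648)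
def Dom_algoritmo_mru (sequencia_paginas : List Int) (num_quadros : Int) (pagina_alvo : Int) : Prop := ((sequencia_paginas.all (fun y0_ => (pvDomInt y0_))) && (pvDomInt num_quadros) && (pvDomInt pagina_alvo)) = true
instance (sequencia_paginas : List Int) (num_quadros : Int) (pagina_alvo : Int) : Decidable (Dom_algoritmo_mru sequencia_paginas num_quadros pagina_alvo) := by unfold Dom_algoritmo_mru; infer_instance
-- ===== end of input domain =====

-- B replaces A's frames list + timestamp dict + per-miss max() scan by one page->slot
-- dictionary plus the fact that the MRU victim is always the previously accessed page (O(1) per access).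


-- ===== PORT A =====
-- one iteration of A's loop; state = (quadros, uso_recente), item = (tempo, pagina)
def mruStepA (num_quadros : Int) (st : List Int × PySem.Dict Int Int) (tp : Int × Int) :
    List Int × PySem.Dict Int Int :=
  let quadros := st.1
  let uso := st.2
  let tempo := tp.1
  let pagina := tp.2
  if quadros.contains pagina then (quadros, uso.insert pagina tempo)
  else if (quadros.length : Int) < num_quadros then (quadros ++ [pagina], uso.insert pagina tempo)
  else
    match PySem.List.max? uso.keys (fun k => uso.getD k 0) with
    | none => (quadros, uso)   -- Python raises ValueError here (max() on empty dict); excluded by Pre_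
    | some pagina_mru =>
      match PySem.List.index? quadros pagina_mru with
      | none => (quadros, uso) -- Python raises ValueError here (unreachable: pagina_mru is a key, keys are frames)
      | some indice => (quadros.set indice pagina, (uso.erase pagina_mru).insert pagina tempo)

def algoritmo_mru (sequencia_paginas : List Int) (num_quadros : Int) (pagina_alvo : Int) : String :=
  let fin := (PySem.List.enumerate sequencia_paginas 0).foldl (mruStepA num_quadros) ([], PySem.Dict.empty)
  match PySem.List.index? fin.1 pagina_alvo with
  | some indice =>
      "Para a sequência fornecida, a página " ++ PySem.Int.toStr pagina_alvo ++
        " se encontra no Quadro " ++ PySem.Int.toStr ((indice : Int) + 1) ++ "."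
  | none => "Ao final, a página " ++ PySem.Int.toStr pagina_alvo ++ " não estava na memória."

-- ===== PORT B =====
-- one iteration of B's loop; state = (pos : page -> slot, mru : page accessed on the previous step)
def mruStepB (num_quadros : Int) (st : PySem.Dict Int Int × Option Int) (pagina : Int) :
    PySem.Dict Int Int × Option Int :=
  let pos := st.1
  let mru := st.2
  let pos' :=
    if pos.contains pagina then pos
    else if (pos.size : Int) < num_quadros then pos.insert pagina (pos.size : Int)
    else
      match mru with
      | none => pos      -- Python raises KeyError here (pos.pop(None)); excluded by Pre_
      | some m =>
        match pos.pop? m with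
        | none => pos    -- Python raises KeyError here (unreachable: the MRU page is resident)
        | some sr => sr.2.insert pagina sr.1
  (pos', some pagina)

def algoritmo_mru_alt (sequencia_paginas : List Int) (num_quadros : Int) (pagina_alvo : Int) : String :=
  let fin := sequencia_paginas.foldl (mruStepB num_quadros) (PySem.Dict.empty, none)
  match fin.1.get? pagina_alvo with
  | some slot =>
      "Para a sequência fornecida, a página " ++ PySem.Int.toStr pagina_alvo ++
        " se encontra no Quadro " ++ PySem.Int.toStr (slot + 1) ++ "."
  | none => "Ao final, a página " ++ PySem.Int.toStr pagina_alvo ++ " não estava na memória."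

-- ===== PRECONDITION & SPEC =====
-- Pre_ excludes exactly the inputs where the Python A raises: with num_quadros < 1 and a nonempty
-- sequence, the first access is a miss with no room and max() is taken over an empty dict (ValueError).
def Pre_algoritmo_mru (sequencia_paginas : List Int) (num_quadros : Int) (pagina_alvo : Int) : Prop :=
  sequencia_paginas = [] ∨ 1 ≤ num_quadros
instance (sequencia_paginas : List Int) (num_quadros : Int) (pagina_alvo : Int) : Decidable (Pre_algoritmo_mru sequencia_paginas num_quadros pagina_alvo) := by unfold Pre_algoritmo_mru; infer_instance

def pvWitness_algoritmo_mru : List Int × Int × Int := ([1, 2, 3, 1, 4], 2, 4)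

def Spec_algoritmo_mru (sequencia_paginas : List Int) (num_quadros : Int) (pagina_alvo : Int) (out : String) : Prop := out = algoritmo_mru_alt sequencia_paginas num_quadros pagina_alvo
instance (sequencia_paginas : List Int) (num_quadros : Int) (pagina_alvo : Int) (out : String) : Decidable (Spec_algoritmo_mru sequencia_paginas num_quadros pagina_alvo out) := by unfold Spec_algoritmo_mru; infer_instance

-- ===== CLAIM (what is proved, stated in full; the proofs are below) =====
def Claim_equal_algoritmo_mru : Prop := ∀ (sequencia_paginas : List Int) (num_quadros : Int) (pagina_alvo : Int), Dom_algoritmo_mru sequencia_paginas num_quadros pagina_alvo → Pre_algoritmo_mru sequencia_paginas num_quadros pagina_alvo → Spec_algoritmo_mru sequencia_paginas num_quadros pagina_alvo (algoritmo_mru sequencia_paginas num_quadros pagina_alvo)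

-- ===== LEMMAS AND PROOFS =====

-- the joint loop invariant tying A's state (quadros, uso) to B's state (pos, mru) before time t
def MruInv (t : Int) (a : List Int × PySem.Dict Int Int) (b : PySem.Dict Int Int × Option Int) : Prop :=
  a.1.Nodup ∧
  a.2.keys.Nodup ∧
  b.1.keys.Nodup ∧
  (∀ (j : Nat) (h : j < a.1.length), b.1.get? a.1[j] = some (j : Int)) ∧
  (∀ p, p ∉ a.1 → b.1.get? p = none) ∧
  b.1.size = a.1.length ∧
  (∀ p, p ∈ a.2.keys ↔ p ∈ a.1) ∧
  (∀ p v, a.2.get? p = some v → v < t) ∧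
  (match b.2 with
   | none => a.1 = []
   | some m => ∃ vm, a.2.get? m = some vm ∧ m ∈ a.1 ∧
       (∀ p v, a.2.get? p = some v → p ≠ m → v < vm))

theorem dict_get?_erase {d : PySem.Dict Int Int} (k k' : Int) :
    (d.erase k).get? k' = if k' = k then none else d.get? k' := by
  obtain ⟨l⟩ := d
  simp only [PySem.Dict.get?, PySem.Dict.erase]
  induction l with
  | nil => simp
  | cons p rest ih =>
    by_cases h1 : p.1 = k
    · rw [List.filter_cons_of_neg (by simp [h1])]
      rw [ih]
      by_cases h2 : k' = k
      · simp [h2]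
      · rw [if_neg h2, if_neg h2, List.find?_cons_of_neg (by simp; omega)]
    · rw [List.filter_cons_of_pos (by simp [h1])]
      by_cases h2 : p.1 = k'
      · rw [List.find?_cons_of_pos (by simp [h2]), List.find?_cons_of_pos (by simp [h2]),
          if_neg (by omega)]
      · rw [List.find?_cons_of_neg (by simp [h2]), List.find?_cons_of_neg (by simp [h2]), ih]

theorem dict_nodup_keys_erase {d : PySem.Dict Int Int} (k : Int) (h : d.keys.Nodup) :
    (d.erase k).keys.Nodup := by
  obtain ⟨l⟩ := d
  simp only [PySem.Dict.keys, PySem.Dict.erase] at *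
  exact h.sublist (List.filter_sublist.map _)

theorem dict_size_erase {d : PySem.Dict Int Int} (k : Int) (h : d.keys.Nodup)
    (hc : d.contains k = true) : (d.erase k).size + 1 = d.size := by
  obtain ⟨l⟩ := d
  simp only [PySem.Dict.size, PySem.Dict.erase, PySem.Dict.contains, PySem.Dict.keys] at *
  induction l with
  | nil => simp at hc
  | cons p rest ih =>
    simp only [List.map_cons, List.nodup_cons] at h
    by_cases h1 : p.1 = k
    · have hrest : rest.filter (fun q => !(q.1 == k)) = rest := by
        apply List.filter_eq_self.mpr
        intro q hq
        simp only [Bool.not_eq_eq_eq_not, Bool.not_true, beq_eq_false_iff_ne, ne_eq]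
        intro hqk
        exact h.1 (by rw [← h1] at hqk; exact (List.mem_map.mpr ⟨q, hq, hqk ▸ rfl⟩))
      rw [List.filter_cons_of_neg (by simp [h1])]
      simp [hrest]
    · have hc' : rest.any (fun p => p.1 == k) = true := by
        simp_all [List.any_cons, beq_iff_eq]
      rw [List.filter_cons_of_pos (by simp [h1])]
      simpa using ih h.2 hc'

theorem max?_aux {key : Int → Int} {m : Int} :
    ∀ (l : List Int) (a : Int), (∀ y ∈ l, y ≠ m → key y < key m) →
      (a = m ∨ (key a < key m ∧ m ∈ l)) →
      l.foldl (fun acc x => match acc with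
        | none => some x
        | some b => if key b < key x then some x else some b) (some a) = some m := by
  intro l
  induction l with
  | nil =>
    intro a _ hacc
    rcases hacc with rfl | ⟨_, hml⟩
    · rfl
    · simp at hml
  | cons x t ih =>
    intro a hkey hacc
    simp only [List.foldl_cons]
    have hkey' : ∀ y ∈ t, y ≠ m → key y < key m :=
      fun y hy => hkey y (List.mem_cons_of_mem _ hy)
    rcases hacc with h1 | ⟨hka, hml⟩
    · rw [h1]
      by_cases hx : x = m
      · subst hx
        split <;> exact ih _ hkey' (Or.inl rfl)
      · have := hkey x List.mem_cons_self hx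
        rw [if_neg (by omega)]
        exact ih _ hkey' (Or.inl rfl)
    · by_cases hx : x = m
      · subst hx
        rw [if_pos hka]
        exact ih _ hkey' (Or.inl rfl)
      · have hmt : m ∈ t := by
          rcases List.mem_cons.mp hml with h1 | h'
          · exact absurd h1.symm hx
          · exact h'
        have hkx := hkey x List.mem_cons_self hx
        split
        · exact ih _ hkey' (Or.inr ⟨hkx, hmt⟩)
        · exact ih _ hkey' (Or.inr ⟨hka, hmt⟩)

theorem max?_eq_some_unique {xs : List Int} {key : Int → Int} {m : Int} (hm : m ∈ xs)
    (h : ∀ y ∈ xs, y ≠ m → key y < key m) : PySem.List.max? xs key = some m := by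
  have hbr : PySem.List.max? xs key = List.foldl (fun acc x => match acc with
      | none => some x
      | some b => if key b < key x then some x else some b) none xs := by
    unfold PySem.List.max?
    congr 1
    funext acc x
    cases acc <;> rfl
  rw [hbr]
  cases xs with
  | nil => simp at hm
  | cons x t =>
    simp only [List.foldl_cons]
    have hkey' : ∀ y ∈ t, y ≠ m → key y < key m :=
      fun y hy => h y (List.mem_cons_of_mem _ hy)
    by_cases hx : x = m
    · exact max?_aux t x hkey' (Or.inl hx)
    · have hmt : m ∈ t := by
        rcases List.mem_cons.mp hm with h1 | h1
        · exact absurd h1.symm hx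
        · exact h1
      exact max?_aux t x hkey' (Or.inr ⟨h x List.mem_cons_self hx, hmt⟩)

theorem mem_set_iff {l : List Int} {i : Nat} {v : Int} (hnd : l.Nodup) (hi : i < l.length)
    (p : Int) : p ∈ l.set i v ↔ (p = v ∨ (p ∈ l ∧ p ≠ l[i])) := by
  constructor
  · intro hp
    obtain ⟨j, hj, hjp⟩ := List.mem_iff_getElem.mp hp
    rw [List.length_set] at hj
    rw [List.getElem_set] at hjp
    by_cases hji : i = j
    · rw [if_pos hji] at hjp; exact Or.inl hjp.symm
    · rw [if_neg hji] at hjp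
      refine Or.inr ⟨hjp ▸ List.getElem_mem hj, ?_⟩
      rw [← hjp]
      intro hcontra
      exact hji ((List.Nodup.getElem_inj_iff hnd).mp hcontra).symm
  · rintro (rfl | ⟨hpl, hpne⟩)
    · exact List.mem_iff_getElem.mpr ⟨i, by simpa using hi, by simp [List.getElem_set]⟩
    · obtain ⟨j, hj, hjp⟩ := List.mem_iff_getElem.mp hpl
      have hji : ¬ i = j := by
        intro h
        subst h
        exact hpne hjp.symm
      exact List.mem_iff_getElem.mpr ⟨j, by simpa using hj,
        by rw [List.getElem_set, if_neg hji, hjp]⟩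

theorem mem_keys_erase {d : PySem.Dict Int Int} (k p : Int) :
    p ∈ (d.erase k).keys ↔ (p ≠ k ∧ p ∈ d.keys) := by
  rw [← PySem.Dict.contains_iff_mem_keys, ← PySem.Dict.contains_iff_mem_keys,
    PySem.Dict.contains_eq_isSome_get?, PySem.Dict.contains_eq_isSome_get?,
    dict_get?_erase]
  by_cases hpk : p = k <;> simp [hpk]

theorem mru_step (num_quadros : Int) (hq : 1 ≤ num_quadros) (t pg : Int)
    (a : List Int × PySem.Dict Int Int) (b : PySem.Dict Int Int × Option Int)
    (hI : MruInv t a b) :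
    MruInv (t + 1) (mruStepA num_quadros a (t, pg)) (mruStepB num_quadros b pg) := by
  obtain ⟨quadros, uso⟩ := a
  obtain ⟨pos, mru⟩ := b
  obtain ⟨h1, h2, h3, h4, h5, h6, h7, h8, h9⟩ := hI
  dsimp only at h1 h2 h3 h4 h5 h6 h7 h8 h9
  have hcontains : pos.contains pg = quadros.contains pg := by
    rw [PySem.Dict.contains_eq_isSome_get?, show quadros.contains pg = decide (pg ∈ quadros) from by simp [List.contains_iff_mem]]
    by_cases hp : pg ∈ quadros
    · obtain ⟨j, hj, hjp⟩ := List.mem_iff_getElem.mp hp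
      rw [← hjp, h4 j hj]; simp [hjp ▸ hp]
    · rw [h5 pg hp]; simp [hp]
  by_cases hmem : pg ∈ quadros
  · -- HIT
    have hb : quadros.contains pg = true := by simp [List.contains_iff_mem, hmem]
    have hA : mruStepA num_quadros (quadros, uso) (t, pg) = (quadros, uso.insert pg t) := by
      unfold mruStepA; simp only; rw [if_pos hb]
    have hB : mruStepB num_quadros (pos, mru) pg = (pos, some pg) := by
      unfold mruStepB; simp only; rw [if_pos (hcontains.trans hb)]
    rw [hA, hB]
    refine ⟨h1, PySem.Dict.nodup_keys_insert _ _ _ h2, h3, h4, h5, h6, ?_, ?_, ?_⟩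
    · intro p
      rw [PySem.Dict.mem_keys_insert]
      constructor
      · rintro (rfl | hk)
        · exact hmem
        · exact (h7 p).mp hk
      · intro hp; exact Or.inr ((h7 p).mpr hp)
    · intro p v hpv
      rw [PySem.Dict.get?_insert] at hpv
      split at hpv
      · cases hpv; omega
      · have := h8 p v hpv; omega
    · refine ⟨t, PySem.Dict.get?_insert_self _ _ _, hmem, ?_⟩
      intro p v hpv hne
      rw [PySem.Dict.get?_insert, if_neg hne] at hpv
      exact h8 p v hpv
  · -- MISS
    have hb : quadros.contains pg = false := by simp [List.contains_iff_mem, hmem]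
    have hbn : ¬ quadros.contains pg = true := by rw [hb]; simp
    have hbn' : ¬ pos.contains pg = true := by rw [hcontains, hb]; simp
    have hposnone : pos.get? pg = none := h5 pg hmem
    have hposcont : pos.contains pg = false := by
      rw [PySem.Dict.contains_eq_isSome_get?, hposnone]; rfl
    by_cases hroom : (quadros.length : Int) < num_quadros
    · -- MISS WITH ROOM
      have hroom' : ((pos.size : Int) < num_quadros) := by rw [h6]; exact hroom
      have hA : mruStepA num_quadros (quadros, uso) (t, pg) = (quadros ++ [pg], uso.insert pg t) := by
        unfold mruStepA; simp only; rw [if_neg hbn, if_pos hroom]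
      have hB : mruStepB num_quadros (pos, mru) pg = (pos.insert pg (pos.size : Int), some pg) := by
        unfold mruStepB; simp only; rw [if_neg hbn', if_pos hroom']
      rw [hA, hB]
      have hje : ∀ (j : Nat) (hji : j < quadros.length), quadros[j] ≠ pg := by
        intro j hji h
        exact hmem (h ▸ List.getElem_mem hji)
      refine ⟨by
          simp [List.nodup_append, h1, hmem]
          intro a ha h
          exact hmem (h ▸ ha), PySem.Dict.nodup_keys_insert _ _ _ h2,
        PySem.Dict.nodup_keys_insert _ _ _ h3, ?_, ?_, ?_, ?_, ?_, ?_⟩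
      · intro j hj
        simp only [List.length_append, List.length_singleton] at hj
        by_cases hji : j < quadros.length
        · rw [List.getElem_append_left hji, PySem.Dict.get?_insert,
            if_neg (hje j hji), h4 j hji]
        · have hj' : j = quadros.length := by omega
          subst hj'
          rw [List.getElem_concat_length, PySem.Dict.get?_insert_self, h6]
          rfl
      · intro p hp
        rw [List.mem_append, List.mem_singleton] at hp
        push_neg at hp
        rw [PySem.Dict.get?_insert, if_neg hp.2, h5 p hp.1]
      · rw [PySem.Dict.size_insert, hposcont, List.length_append, List.length_singleton, h6]
        simp
      · intro p
        rw [PySem.Dict.mem_keys_insert, List.mem_append, List.mem_singleton]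
        constructor
        · rintro (rfl | hk)
          · exact Or.inr rfl
          · exact Or.inl ((h7 p).mp hk)
        · rintro (hp | rfl)
          · exact Or.inr ((h7 p).mpr hp)
          · exact Or.inl rfl
      · intro p v hpv
        rw [PySem.Dict.get?_insert] at hpv
        split at hpv
        · cases hpv; omega
        · have := h8 p v hpv; omega
      · refine ⟨t, PySem.Dict.get?_insert_self _ _ _, by simp, ?_⟩
        intro p v hpv hne
        rw [PySem.Dict.get?_insert, if_neg hne] at hpv
        exact h8 p v hpv
    · -- MISS WITH FULL MEMORY
      have hroom' : ¬ ((pos.size : Int) < num_quadros) := by rw [h6]; exact hroom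
      have hlen : 1 ≤ quadros.length := by omega
      have hqne : quadros ≠ [] := by
        intro h; rw [h] at hlen; simp at hlen
      cases hmru : mru with
      | none =>
        rw [hmru] at h9
        exact absurd h9 hqne
      | some m =>
        rw [hmru] at h9
        obtain ⟨vm, hvm, hmq, hmax⟩ := h9
        have hmk : m ∈ uso.keys := (h7 m).mpr hmq
        have hmaxeq : PySem.List.max? uso.keys (fun k => uso.getD k 0) = some m := by
          apply max?_eq_some_unique hmk
          intro y hy hyne
          have hyc : (uso.get? y).isSome := by
            rw [← PySem.Dict.contains_eq_isSome_get?, PySem.Dict.contains_iff_mem_keys]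
            exact hy
          obtain ⟨v, hv⟩ := Option.isSome_iff_exists.mp hyc
          simp only [PySem.Dict.getD_eq_get?_getD, hv, hvm, Option.getD_some]
          exact hmax y v hv hyne
        cases hidx : PySem.List.index? quadros m with
        | none => exact absurd hmq ((PySem.List.index?_eq_none_iff quadros m).mp hidx)
        | some i =>
          obtain ⟨hi, hqi, _⟩ := PySem.List.getElem_of_index?_eq_some hidx
          have hgm : pos.get? m = some (i : Int) := by rw [← hqi]; exact h4 i hi
          have hpop : pos.pop? m = some ((i : Int), pos.erase m) := by
            simp [PySem.Dict.pop?, hgm]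
          have hA : mruStepA num_quadros (quadros, uso) (t, pg) =
              (quadros.set i pg, (uso.erase m).insert pg t) := by
            unfold mruStepA; simp only; rw [if_neg hbn, if_neg hroom]; simp only [hmaxeq, hidx]
          have hB : mruStepB num_quadros (pos, some m) pg =
              ((pos.erase m).insert pg (i : Int), some pg) := by
            unfold mruStepB; simp only; rw [if_neg hbn', if_neg hroom']; simp only [hpop]
          rw [hA, hB]
          have hmne : m ≠ pg := fun h => hmem (h ▸ hmq)
          have hcontm : pos.contains m = true := by
            rw [PySem.Dict.contains_eq_isSome_get?, hgm]; rfl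
          have herasec : (pos.erase m).contains pg = false := by
            rw [PySem.Dict.contains_eq_isSome_get?, dict_get?_erase,
              if_neg (fun h => hmne h.symm), hposnone]; rfl
          have hje : ∀ (j : Nat) (hji : j < quadros.length), quadros[j] ≠ pg := by
            intro j hji h
            exact hmem (h ▸ List.getElem_mem hji)
          refine ⟨h1.set hmem, PySem.Dict.nodup_keys_insert _ _ _ (dict_nodup_keys_erase _ h2),
            PySem.Dict.nodup_keys_insert _ _ _ (dict_nodup_keys_erase _ h3), ?_, ?_, ?_, ?_, ?_, ?_⟩
          · intro j hj
            rw [List.length_set] at hj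
            rw [List.getElem_set]
            by_cases hji : i = j
            · rw [if_pos hji, PySem.Dict.get?_insert_self, hji]
            · rw [if_neg hji, PySem.Dict.get?_insert,
                if_neg (hje j hj),
                dict_get?_erase,
                if_neg (fun h => hji ((List.Nodup.getElem_inj_iff h1).mp (h.trans hqi.symm)).symm),
                h4 j hj]
          · intro p hp
            have hpg : p ≠ pg := by
              intro h
              subst h
              exact hp ((mem_set_iff h1 hi p).mpr (Or.inl rfl))
            rw [PySem.Dict.get?_insert, if_neg hpg, dict_get?_erase]
            by_cases hpm : p = m
            · rw [if_pos hpm]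
            · rw [if_neg hpm]
              apply h5
              intro hpq
              exact hp ((mem_set_iff h1 hi p).mpr (Or.inr ⟨hpq, fun h => hpm (h.trans hqi)⟩))
          · rw [PySem.Dict.size_insert, herasec, if_neg (by simp : ¬(false = true)), List.length_set]
            have := dict_size_erase m h3 hcontm
            omega
          · intro p
            rw [PySem.Dict.mem_keys_insert, mem_keys_erase, mem_set_iff h1 hi p, hqi, h7 p]
            tauto
          · intro p v hpv
            rw [PySem.Dict.get?_insert] at hpv
            split at hpv
            · cases hpv; omega
            · rw [dict_get?_erase] at hpv
              split at hpv
              · cases hpv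
              · have := h8 p v hpv; omega
          · refine ⟨t, PySem.Dict.get?_insert_self _ _ _,
              (mem_set_iff h1 hi pg).mpr (Or.inl rfl), ?_⟩
            intro p v hpv hne
            rw [PySem.Dict.get?_insert, if_neg hne, dict_get?_erase] at hpv
            split at hpv
            · cases hpv
            · exact h8 p v hpv

theorem mru_fold (num_quadros : Int) (hq : 1 ≤ num_quadros) :
    ∀ (l : List Int) (t : Int) (a : List Int × PySem.Dict Int Int)
      (b : PySem.Dict Int Int × Option Int), MruInv t a b →
      MruInv (t + l.length)
        ((PySem.List.enumerate l t).foldl (mruStepA num_quadros) a)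
        (l.foldl (mruStepB num_quadros) b) := by
  intro l
  induction l with
  | nil =>
    intro t a b h
    simpa using h
  | cons x xs ih =>
    intro t a b h
    rw [PySem.List.enumerate_cons]
    simp only [List.foldl_cons]
    have hstep := ih (t + 1) _ _ (mru_step num_quadros hq t x a b h)
    have harith : t + 1 + (xs.length : Int) = t + ((x :: xs).length : Int) := by
      simp only [List.length_cons]
      push_cast
      ring
    rwa [harith] at hstep

theorem mru_inv_init : MruInv 0 ([], PySem.Dict.empty) (PySem.Dict.empty, none) := by
  refine ⟨List.nodup_nil, ?_, ?_, ?_, ?_, ?_, ?_, ?_, rfl⟩ <;>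
    simp [PySem.Dict.keys_empty, PySem.Dict.get?_empty, PySem.Dict.size_empty]

-- ===== VERDICT (by name: the statement is the Claim_ definition above) =====
theorem algoritmo_mru_spec : Claim_equal_algoritmo_mru := by
  unfold Claim_equal_algoritmo_mru
  intro seq nq pa _ hpre
  unfold Spec_algoritmo_mru
  rcases hpre with rfl | hq
  · rfl
  · unfold algoritmo_mru algoritmo_mru_alt
    have hinv := mru_fold nq hq seq 0 ([], PySem.Dict.empty) (PySem.Dict.empty, none) mru_inv_init
    obtain ⟨h1, h2, h3, h4, h5, h6, h7, h8, h9⟩ := hinv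
    simp only at h4 h5 ⊢
    cases hidx : PySem.List.index?
        ((PySem.List.enumerate seq 0).foldl (mruStepA nq) ([], PySem.Dict.empty)).1 pa with
    | none =>
      have hg : (seq.foldl (mruStepB nq) (PySem.Dict.empty, none)).1.get? pa = none :=
        h5 pa ((PySem.List.index?_eq_none_iff _ _).mp hidx)
      rw [hg]
    | some i =>
      obtain ⟨hi, hqi, _⟩ := PySem.List.getElem_of_index?_eq_some hidx
      have hg : (seq.foldl (mruStepB nq) (PySem.Dict.empty, none)).1.get? pa = some (i : Int) := by
        rw [← hqi]
        exact h4 i hi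
      rw [hg]
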